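-- pv_equiv track=rewrite | github.com/YianXie/freecodecamp-challenges | solutions/2025-dec/31/markdown_italic_parser.py | parse_italics
-- ===== SOURCE A (Python) =====
-- def parse_italics(markdown):
--     prev = None
--     idx = []
--     for i in range(len(markdown)):
--         if prev is None and markdown[i] in ("*", "_"):
--             if i + 1 < len(markdown) and markdown[i + 1] != " ":
--                 prev = i
--         elif prev is not None and markdown[i] in ("*", "_"):
--             if i - 1 >= 0 and markdown[i - 1] != " ":
--                 idx.append(prev)
--                 idx.append(i)
--                 prev = None
--
--     ans = ""
--     for i in range(len(markdown)):
--         if i in idx: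
--             if idx.index(i) % 2 == 0:
--                 ans += "<i>"
--             else:
--                 ans += "</i>"
--         else:
--             ans += markdown[i]
--
--     return ans
-- ===== SOURCE B (Python) =====
-- def parse_italics(markdown):
--     # Single pass: emit literal segments and <i>...</i> pairs directly,
--     # no idx list and no quadratic membership/index scan.
--     n = len(markdown)
--     parts = []
--     prev = None
--     last = 0
--     for i in range(n):
--         c = markdown[i]
--         if c == "*" or c == "_":
--             if prev is None:
--                 if i + 1 < n and markdown[i + 1] != " ":
--                     prev = i
--             elif markdown[i - 1] != " ":
--                 parts.append(markdown[last:prev])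
--                 parts.append("<i>")
--                 parts.append(markdown[prev + 1:i])
--                 parts.append("</i>")
--                 last = i + 1
--                 prev = None
--     parts.append(markdown[last:])
--     return "".join(parts)
-- ===== Notes on version B (the rewrite author's own statement) =====
-- stated objective: faster
-- what changed: A collects marker positions in a list idx and then re-renders the whole string with an `i in idx` membership test plus `idx.index(i)` inside the character loop (quadratic in practice); B emits the output in a single pass, appending the literal slice and the <i>/</i> tags as soon as a pair closes, with no idx list and no second pass.
import Mathlib
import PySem

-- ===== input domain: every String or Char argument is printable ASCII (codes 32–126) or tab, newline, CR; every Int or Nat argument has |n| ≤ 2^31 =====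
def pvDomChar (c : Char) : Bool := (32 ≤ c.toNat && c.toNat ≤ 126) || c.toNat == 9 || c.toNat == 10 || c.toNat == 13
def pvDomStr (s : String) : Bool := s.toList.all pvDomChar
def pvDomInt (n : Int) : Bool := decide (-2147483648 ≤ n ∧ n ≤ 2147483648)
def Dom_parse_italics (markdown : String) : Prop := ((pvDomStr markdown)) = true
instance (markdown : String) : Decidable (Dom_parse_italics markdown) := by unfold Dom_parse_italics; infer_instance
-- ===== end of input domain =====

-- B replaces A's quadratic second pass (for each position, `i in idx` plus `idx.index(i)`)
-- by a single pass that emits the literal slices and the <i>/</i> tags directly.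
-- In all loops below, `fuel` is only the structural totality device for the Python
-- `for i in range(len(markdown))` loop: it starts at `s.length` and counts the remaining iterations.

-- ===== PORT A =====
-- markdown[i] for an index the loop keeps in range (exact there)
def pyChar (s : List Char) (i : Nat) : Char := s.getD i ' '

-- first loop of A: walk i over range(len(markdown)), collecting idx
def scanA (s : List Char) (fuel : Nat) (i : Nat) (prev : Option Nat) (idx : List Nat) : List Nat :=
  match fuel with
  | 0 => idx
  | fuel + 1 =>
    if i < s.length then
      if prev.isNone ∧ (pyChar s i = '*' ∨ pyChar s i = '_') then
        if i + 1 < s.length ∧ pyChar s (i + 1) ≠ ' ' then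
          scanA s fuel (i + 1) (some i) idx
        else
          scanA s fuel (i + 1) prev idx
      else if prev.isSome ∧ (pyChar s i = '*' ∨ pyChar s i = '_') then
        if 1 ≤ i ∧ pyChar s (i - 1) ≠ ' ' then
          scanA s fuel (i + 1) none (idx ++ [prev.getD 0, i])
        else
          scanA s fuel (i + 1) prev idx
      else
        scanA s fuel (i + 1) prev idx
    else idx

-- second loop of A: ans += … ; idx.index(i) = List.idxOf i idx (exact since evaluated only when i ∈ idx)
def renderA (s : List Char) (idx : List Nat) (fuel : Nat) (i : Nat) (ans : List Char) : List Char :=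
  match fuel with
  | 0 => ans
  | fuel + 1 =>
    if i < s.length then
      renderA s idx fuel (i + 1)
        (if i ∈ idx then
          (if idx.idxOf i % 2 = 0 then ans ++ ['<', 'i', '>'] else ans ++ ['<', '/', 'i', '>'])
         else ans ++ [pyChar s i])
    else ans

def parse_italics (markdown : String) : String :=
  let s := markdown.toList
  String.mk (renderA s (scanA s s.length 0 none []) s.length 0 [])

-- ===== PORT B =====
-- markdown[a:b] for 0 ≤ a ≤ b (exact there)
def seg (s : List Char) (a b : Nat) : List Char := (s.drop a).take (b - a)

-- B's single loop: collect the output parts directly; at loop exit append the literal tail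
def scanB (s : List Char) (fuel : Nat) (i : Nat) (prev : Option Nat) (last : Nat)
    (parts : List (List Char)) : List (List Char) :=
  match fuel with
  | 0 => parts ++ [seg s last s.length]
  | fuel + 1 =>
    if i < s.length then
      if pyChar s i = '*' ∨ pyChar s i = '_' then
        match prev with
        | none =>
          if i + 1 < s.length ∧ pyChar s (i + 1) ≠ ' ' then
            scanB s fuel (i + 1) (some i) last parts
          else
            scanB s fuel (i + 1) none last parts
        | some p =>
          if pyChar s (i - 1) ≠ ' ' then
            scanB s fuel (i + 1) none (i + 1)
              (parts ++ [seg s last p, ['<', 'i', '>'], seg s (p + 1) i, ['<', '/', 'i', '>']])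
          else
            scanB s fuel (i + 1) (some p) last parts
      else
        scanB s fuel (i + 1) prev last parts
    else parts ++ [seg s last s.length]

def parse_italics_alt (markdown : String) : String :=
  let s := markdown.toList
  String.mk (scanB s s.length 0 none 0 []).flatten

-- ===== PRECONDITION & SPEC =====
def Spec_parse_italics (markdown : String) (out : String) : Prop := out = parse_italics_alt markdown
instance (markdown : String) (out : String) : Decidable (Spec_parse_italics markdown out) := by unfold Spec_parse_italics; infer_instance

-- ===== CLAIM (what is proved, stated in full; the proofs are below) =====
def Claim_equal_parse_italics : Prop := ∀ (markdown : String), Dom_parse_italics markdown → Spec_parse_italics markdown (parse_italics markdown)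

-- ===== LEMMAS AND PROOFS =====

-- the abstract list of (open, close) marker pairs both scans follow
def pairsOf (s : List Char) (fuel : Nat) (i : Nat) (prev : Option Nat) : List (Nat × Nat) :=
  match fuel with
  | 0 => []
  | fuel + 1 =>
    if i < s.length then
      if pyChar s i = '*' ∨ pyChar s i = '_' then
        match prev with
        | none =>
          if i + 1 < s.length ∧ pyChar s (i + 1) ≠ ' ' then
            pairsOf s fuel (i + 1) (some i)
          else
            pairsOf s fuel (i + 1) none
        | some p =>
          if 1 ≤ i ∧ pyChar s (i - 1) ≠ ' ' then
            (p, i) :: pairsOf s fuel (i + 1) none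
          else
            pairsOf s fuel (i + 1) (some p)
      else
        pairsOf s fuel (i + 1) prev
    else []

def flatP (R : List (Nat × Nat)) : List Nat := R.flatMap (fun pc => [pc.1, pc.2])

-- B's builder, the shared proof target
def buildFrom (s : List Char) (last : Nat) : List (Nat × Nat) → List Char
  | [] => seg s last s.length
  | (p, c) :: R =>
      seg s last p ++ ['<', 'i', '>'] ++ seg s (p + 1) c ++ ['<', '/', 'i', '>'] ++
        buildFrom s (c + 1) R

theorem scanA_eq (s : List Char) : ∀ k i prev idx,
    scanA s k i prev idx = idx ++ flatP (pairsOf s k i prev) := by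
  intro k
  induction k with
  | zero =>
    intro i prev idx
    simp [scanA, pairsOf, flatP]
  | succ k ih =>
    intro i prev idx
    cases prev with
    | none =>
      rw [scanA, pairsOf]
      by_cases hi : i < s.length
      · rw [if_pos hi, if_pos hi]
        by_cases hm : pyChar s i = '*' ∨ pyChar s i = '_'
        · rw [if_pos ⟨rfl, hm⟩, if_pos hm]
          by_cases hc : i + 1 < s.length ∧ pyChar s (i + 1) ≠ ' '
          · rw [if_pos hc, if_pos hc]; exact ih _ _ _
          · rw [if_neg hc, if_neg hc]; exact ih _ _ _
        · rw [if_neg (fun h => hm h.2), if_neg (by simp), if_neg hm]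
          exact ih _ _ _
      · rw [if_neg hi, if_neg hi]; simp [flatP]
    | some p =>
      rw [scanA, pairsOf]
      by_cases hi : i < s.length
      · rw [if_pos hi, if_pos hi]
        by_cases hm : pyChar s i = '*' ∨ pyChar s i = '_'
        · rw [if_neg (by simp), if_pos ⟨rfl, hm⟩, if_pos hm]
          by_cases hc : 1 ≤ i ∧ pyChar s (i - 1) ≠ ' '
          · rw [if_pos hc, if_pos hc, ih _ _ _]
            simp [flatP]
          · rw [if_neg hc, if_neg hc]; exact ih _ _ _
        · rw [if_neg (by simp), if_neg (fun h => hm h.2), if_neg hm]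
          exact ih _ _ _
      · rw [if_neg hi, if_neg hi]; simp [flatP]

theorem scanB_eq (s : List Char) : ∀ k i prev last parts,
    (∀ p, prev = some p → p < i) →
    (scanB s k i prev last parts).flatten = parts.flatten ++ buildFrom s last (pairsOf s k i prev) := by
  intro k
  induction k with
  | zero =>
    intro i prev last parts _
    simp [scanB, pairsOf, buildFrom]
  | succ k ih =>
    intro i prev last parts hprev
    cases prev with
    | none =>
      rw [scanB, pairsOf]
      by_cases hi : i < s.length
      · rw [if_pos hi, if_pos hi]
        by_cases hm : pyChar s i = '*' ∨ pyChar s i = '_'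
        · rw [if_pos hm, if_pos hm]
          by_cases hc : i + 1 < s.length ∧ pyChar s (i + 1) ≠ ' '
          · rw [if_pos hc, if_pos hc]
            exact ih _ _ _ _ (by intro p h; cases h; omega)
          · rw [if_neg hc, if_neg hc]
            exact ih _ _ _ _ (by intro p h; cases h)
        · rw [if_neg hm, if_neg hm]
          exact ih _ _ _ _ (by intro p h; cases h)
      · rw [if_neg hi, if_neg hi]
        simp [buildFrom]
    | some p =>
      have hp : p < i := hprev p rfl
      rw [scanB, pairsOf]
      by_cases hi : i < s.length
      · rw [if_pos hi, if_pos hi]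
        by_cases hm : pyChar s i = '*' ∨ pyChar s i = '_'
        · rw [if_pos hm, if_pos hm]
          by_cases hc : pyChar s (i - 1) ≠ ' '
          · have hc' : 1 ≤ i ∧ pyChar s (i - 1) ≠ ' ' := ⟨by omega, hc⟩
            rw [if_pos hc, if_pos hc']
            rw [ih _ _ _ _ (by intro q h; cases h)]
            simp [buildFrom, List.append_assoc]
          · have hc' : ¬ (1 ≤ i ∧ pyChar s (i - 1) ≠ ' ') := by
              intro h; exact hc h.2
            rw [if_neg hc, if_neg hc']
            exact ih _ _ _ _ (by intro q h; cases h; omega)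
        · rw [if_neg hm, if_neg hm]
          exact ih _ _ _ _ (by intro q h; cases h; omega)
      · rw [if_neg hi, if_neg hi]
        simp [buildFrom]

def lbP (i : Nat) (prev : Option Nat) : Nat := match prev with | some p => p | none => i

theorem pairs_inv (s : List Char) : ∀ k i prev,
    (∀ p, prev = some p → p < i) →
    List.Pairwise (· < ·) (flatP (pairsOf s k i prev)) ∧
      ∀ x ∈ flatP (pairsOf s k i prev), lbP i prev ≤ x ∧ x < s.length := by
  intro k
  induction k with
  | zero =>
    intro i prev _
    simp [pairsOf, flatP]
  | succ k ih =>
    intro i prev hprev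
    cases prev with
    | none =>
      rw [pairsOf]
      by_cases hi : i < s.length
      · rw [if_pos hi]
        by_cases hm : pyChar s i = '*' ∨ pyChar s i = '_'
        · rw [if_pos hm]
          by_cases hc : i + 1 < s.length ∧ pyChar s (i + 1) ≠ ' '
          · rw [if_pos hc]
            have h := ih (i + 1) (some i) (by intro p hp; cases hp; omega)
            refine ⟨h.1, fun x hx => ?_⟩
            have := h.2 x hx
            simp only [lbP] at this ⊢
            omega
          · rw [if_neg hc]
            have h := ih (i + 1) none (by intro p hp; cases hp)
            refine ⟨h.1, fun x hx => ?_⟩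
            have := h.2 x hx
            simp only [lbP] at this ⊢
            omega
        · rw [if_neg hm]
          have h := ih (i + 1) none (by intro q hq; cases hq)
          refine ⟨h.1, fun x hx => ?_⟩
          have := h.2 x hx
          simp only [lbP] at this ⊢
          omega
      · rw [if_neg hi]; simp [flatP]
    | some p =>
      have hp : p < i := hprev p rfl
      rw [pairsOf]
      by_cases hi : i < s.length
      · rw [if_pos hi]
        by_cases hm : pyChar s i = '*' ∨ pyChar s i = '_'
        · rw [if_pos hm]
          by_cases hc : 1 ≤ i ∧ pyChar s (i - 1) ≠ ' '
          · rw [if_pos hc]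
            have h := ih (i + 1) none (by intro q hq; cases hq)
            have hbnd : ∀ x ∈ flatP (pairsOf s k (i + 1) none), i + 1 ≤ x ∧ x < s.length := by
              intro x hx
              have := h.2 x hx
              simp only [lbP] at this
              omega
            constructor
            · simp only [flatP, List.flatMap_cons, List.cons_append, List.nil_append] at h ⊢
              refine List.Pairwise.cons ?_ (List.Pairwise.cons ?_ h.1)
              · intro x hx
                simp only [List.mem_cons] at hx
                rcases hx with rfl | hx
                · omega
                · have := hbnd x (by simpa [flatP] using hx)
                  omega
              · intro x hx
                have := hbnd x (by simpa [flatP] using hx)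
                omega
            · intro x hx
              simp only [flatP, List.flatMap_cons, List.cons_append, List.nil_append,
                List.mem_cons] at hx
              simp only [lbP]
              rcases hx with rfl | rfl | hx
              · omega
              · omega
              · have := hbnd x (by simpa [flatP] using hx)
                omega
          · rw [if_neg hc]
            have h := ih (i + 1) (some p) (by intro q hq; cases hq; omega)
            refine ⟨h.1, fun x hx => ?_⟩
            have := h.2 x hx
            simp only [lbP] at this ⊢
            omega
        · rw [if_neg hm]
          have h := ih (i + 1) (some p) (by intro q hq; cases hq; omega)
          refine ⟨h.1, fun x hx => ?_⟩
          have := h.2 x hx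
          simp only [lbP] at this ⊢
          omega
      · rw [if_neg hi]; simp [flatP]

theorem idxOf_append_cons {a : List Nat} {x : Nat} (b : List Nat) (hx : x ∉ a) :
    (a ++ x :: b).idxOf x = a.length := by
  induction a with
  | nil => simp
  | cons y a ih =>
    have hyx : y ≠ x := by intro h; exact hx (by simp [h])
    have hxa : x ∉ a := fun h => hx (List.mem_cons_of_mem _ h)
    simp [hyx, ih hxa]

theorem seg_cons (s : List Char) {j m : Nat} (hj : j < m) (hm : m ≤ s.length) :
    seg s j m = pyChar s j :: seg s (j + 1) m := by
  have hjs : j < s.length := by omega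
  unfold seg pyChar
  rw [List.drop_eq_getElem_cons hjs]
  have : m - j = (m - (j + 1)) + 1 := by omega
  rw [this, List.take_succ_cons, List.getD_eq_getElem s ' ' hjs]

theorem renderA_fuel (s : List Char) (idx : List Nat) : ∀ k k' i ans,
    s.length - i ≤ k → s.length - i ≤ k' →
    renderA s idx k i ans = renderA s idx k' i ans := by
  intro k
  induction k with
  | zero =>
    intro k' i ans hk hk'
    have hi : ¬ i < s.length := by omega
    cases k' <;> simp [renderA, hi]
  | succ k ih =>
    intro k' i ans hk hk'
    by_cases hi : i < s.length
    · cases k' with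
      | zero => omega
      | succ k' =>
        rw [renderA, renderA, if_pos hi, if_pos hi]
        exact ih k' (i + 1) _ (by omega) (by omega)
    · cases k' <;> simp [renderA, hi]

theorem renderA_end (s : List Char) (idx : List Nat) (k : Nat) (ans : List Char) :
    renderA s idx k s.length ans = ans := by
  cases k <;> simp [renderA]

theorem renderLit (s : List Char) (idx : List Nat) : ∀ k m j ans,
    s.length - j ≤ k → j ≤ m → m ≤ s.length →
    (∀ x ∈ idx, x < j ∨ m ≤ x) →
    renderA s idx k j ans = renderA s idx k m (ans ++ seg s j m) := by
  intro k
  induction k with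
  | zero =>
    intro m j ans hk hjm hm hout
    have : j = m := by omega
    subst this
    simp [seg]
  | succ k ih =>
    intro m j ans hk hjm hm hout
    by_cases hjm' : j = m
    · subst hjm'; simp [seg]
    · have hj : j < m := by omega
      have hjs : j < s.length := by omega
      conv_lhs => rw [renderA]
      rw [if_pos hjs]
      have hnotmem : j ∉ idx := by
        intro h
        rcases hout j h with h' | h' <;> omega
      rw [if_neg hnotmem]
      rw [ih m (j + 1) (ans ++ [pyChar s j]) (by omega) (by omega) hm
        (by intro x hx; rcases hout x hx with h | h
            exacts [Or.inl (by omega), Or.inr h])]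
      rw [seg_cons s hj hm]
      rw [renderA_fuel s idx k (k + 1) m _ (by omega) (by omega)]
      simp

theorem render_main (s : List Char) : ∀ (R : List (Nat × Nat)) (pre : List Nat) k j ans,
    s.length - j ≤ k → pre.length % 2 = 0 → (∀ x ∈ pre, x < j) →
    (∀ x ∈ flatP R, j ≤ x ∧ x < s.length) →
    List.Pairwise (· < ·) (pre ++ flatP R) → j ≤ s.length →
    renderA s (pre ++ flatP R) k j ans = ans ++ buildFrom s j R := by
  intro R
  induction R with
  | nil =>
    intro pre k j ans hk _ hpre _ _ hj
    simp only [flatP, List.flatMap_nil, List.append_nil, buildFrom]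
    rw [renderLit s pre k s.length j ans hk hj le_rfl
      (by intro x hx; left; exact hpre x hx)]
    rw [renderA_end]
  | cons pc R ih =>
    obtain ⟨p, c⟩ := pc
    intro pre k j ans hk hev hpre hbnd hpair hj
    have hflat : pre ++ flatP ((p, c) :: R) = pre ++ p :: c :: flatP R := by
      simp [flatP]
    have hjp : j ≤ p := (hbnd p (by simp [flatP])).1
    have hpn : p < s.length := (hbnd p (by simp [flatP])).2
    have hcn : c < s.length := (hbnd c (by simp [flatP])).2
    have hafter : ∀ x ∈ c :: flatP R, p < x := by
      have := (List.pairwise_append.mp (hflat ▸ hpair)).2.1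
      exact (List.pairwise_cons.mp this).1
    have hpc : p < c := hafter c (by simp)
    have hafterc : ∀ x ∈ flatP R, c < x := by
      have h1 := (List.pairwise_append.mp (hflat ▸ hpair)).2.1
      have h2 := (List.pairwise_cons.mp (List.pairwise_cons.mp h1).2).1
      exact h2
    have hpnotpre : p ∉ pre := by intro h; have := hpre p h; omega
    have hcnot : c ∉ pre ++ [p] := by
      intro h
      rcases List.mem_append.mp h with h | h
      · have := hpre c h; omega
      · simp at h; omega
    obtain ⟨k1, rfl⟩ : ∃ k1, k = k1 + 1 := ⟨k - 1, by omega⟩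
    obtain ⟨k2, rfl⟩ : ∃ k2, k1 = k2 + 1 := ⟨k1 - 1, by omega⟩
    rw [hflat]
    -- literal run j..p
    rw [renderLit s (pre ++ p :: c :: flatP R) (k2 + 1 + 1) p j ans hk hjp (by omega)
      (by
        intro x hx
        rcases List.mem_append.mp hx with h | h
        · left; exact hpre x h
        · right
          rcases List.mem_cons.mp h with rfl | h
          · exact le_rfl
          · exact le_of_lt (hafter x h))]
    -- step at p : "<i>"
    conv_lhs => rw [renderA]
    rw [if_pos hpn]
    have hmemp : p ∈ pre ++ p :: c :: flatP R := by simp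
    rw [if_pos hmemp, idxOf_append_cons _ hpnotpre, if_pos hev]
    -- literal run p+1..c
    rw [renderLit s (pre ++ p :: c :: flatP R) (k2 + 1) c (p + 1) _ (by omega) (by omega)
      (by omega)
      (by
        intro x hx
        rcases List.mem_append.mp hx with h | h
        · left; have := hpre x h; omega
        · rcases List.mem_cons.mp h with rfl | h
          · left; omega
          · rcases List.mem_cons.mp h with rfl | h
            · right; exact le_rfl
            · right; exact le_of_lt (hafterc x h))]
    -- step at c : "</i>"
    conv_lhs => rw [renderA]
    rw [if_pos hcn]
    have hmemc : c ∈ pre ++ p :: c :: flatP R := by simp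
    have hsplit : pre ++ p :: c :: flatP R = (pre ++ [p]) ++ c :: flatP R := by simp
    rw [if_pos hmemc]
    rw [hsplit, idxOf_append_cons _ hcnot]
    have hodd : ¬ (pre ++ [p]).length % 2 = 0 := by
      simp [List.length_append]; omega
    rw [if_neg hodd]
    -- recurse
    have hre : (pre ++ [p]) ++ c :: flatP R = (pre ++ [p, c]) ++ flatP R := by simp
    rw [hre]
    rw [ih (pre ++ [p, c]) k2 (c + 1) _
      (by omega)
      (by simp [List.length_append]; omega)
      (by
        intro x hx
        rcases List.mem_append.mp hx with h | h
        · have := hpre x h; omega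
        · simp at h; omega)
      (by
        intro x hx
        refine ⟨hafterc x hx, (hbnd x ?_).2⟩
        simp only [flatP, List.flatMap_cons, List.cons_append, List.nil_append]
        exact List.mem_cons_of_mem _ (List.mem_cons_of_mem _ hx))
      (by rw [← hre, ← hsplit, ← hflat]; exact hpair)
      (by omega)]
    simp [buildFrom, List.append_assoc]

-- ===== VERDICT (by name: the statement is the Claim_ definition above) =====
theorem parse_italics_spec : Claim_equal_parse_italics := by
  intro markdown _
  unfold Spec_parse_italics parse_italics parse_italics_alt
  set s := markdown.toList with hs
  have hA := scanA_eq s s.length 0 none []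
  have hB := scanB_eq s s.length 0 none 0 [] (by intro p h; cases h)
  have hinv := pairs_inv s s.length 0 none (by intro p h; cases h)
  have hR := render_main s (pairsOf s s.length 0 none) [] s.length 0 []
    (by omega) (by simp) (by simp)
    (fun x hx => ⟨Nat.zero_le x, (hinv.2 x hx).2⟩)
    (by simpa using hinv.1) (Nat.zero_le _)
  simp only [hA, List.nil_append] at *
  rw [hR]
  rw [hB]
  simp
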